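-- pv_equiv track=rewrite | github.com/boostfield/wx-hongbao | bin/restitution_counter.py | _continue_win_num
-- ===== SOURCE A (Python) =====
-- def _continue_win_num(net_income):
--     result = 0
--     for i in net_income[-2::-1]:
--         if i >= 0:
--             result += 1
--         else:
--             break
--
--     return result
-- ===== SOURCE B (Python) =====
-- def _continue_win_num(net_income):
--     count = 0
--     for v in net_income[:-1]:
--         if v >= 0:
--             count += 1
--         else:
--             count = 0
--     return count
-- ===== Notes on version B (the rewrite author's own statement) =====
-- stated objective: simpler
-- what changed: Replaces the backward walk over the reversed slice net_income[-2::-1] with a break by a single forward pass over net_income[:-1] that keeps a counter reset to 0 on each negative value.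
import Mathlib
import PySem

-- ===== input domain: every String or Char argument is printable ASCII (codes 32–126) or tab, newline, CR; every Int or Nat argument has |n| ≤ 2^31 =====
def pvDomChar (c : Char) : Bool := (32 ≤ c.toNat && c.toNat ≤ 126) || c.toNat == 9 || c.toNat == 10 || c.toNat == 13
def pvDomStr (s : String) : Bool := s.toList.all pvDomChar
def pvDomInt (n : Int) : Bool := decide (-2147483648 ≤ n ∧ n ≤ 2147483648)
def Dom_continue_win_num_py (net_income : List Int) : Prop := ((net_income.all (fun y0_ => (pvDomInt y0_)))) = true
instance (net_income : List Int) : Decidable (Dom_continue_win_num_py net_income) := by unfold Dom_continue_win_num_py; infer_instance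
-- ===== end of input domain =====

-- ===== PORT A =====
-- B replaces A's backward walk over net_income[-2::-1] with a break by a forward
-- pass over net_income[:-1] with a counter reset on negatives (objective: simpler).

-- the 'for i in net_income[-2::-1]: if i >= 0: result += 1 else: break' loop
def pvLoopA : List Int → Int → Int
  | [], r => r
  | i :: rest, r => if i ≥ 0 then pvLoopA rest (r + 1) else r

def continue_win_num_py (net_income : List Int) : Int :=
  -- net_income[-2::-1]; step -1 ≠ 0 so slice? is always some, getD [] is never taken
  pvLoopA ((PySem.List.slice? net_income (some (-2)) none (-1)).getD []) 0

-- ===== PORT B =====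
def continue_win_num_py_alt (net_income : List Int) : Int :=
  (PySem.List.slice net_income none (some (-1))).foldl
    (fun c v => if v ≥ 0 then c + 1 else 0) 0

-- ===== PRECONDITION & SPEC =====
def Spec_continue_win_num_py (net_income : List Int) (out : Int) : Prop := out = continue_win_num_py_alt net_income
instance (net_income : List Int) (out : Int) : Decidable (Spec_continue_win_num_py net_income out) := by unfold Spec_continue_win_num_py; infer_instance

-- ===== CLAIM (what is proved, stated in full; the proofs are below) =====
def Claim_equal_continue_win_num_py : Prop := ∀ (net_income : List Int), Dom_continue_win_num_py net_income → Spec_continue_win_num_py net_income (continue_win_num_py net_income)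

-- ===== LEMMAS AND PROOFS =====

-- net_income[-2::-1] is the reverse of the list without its last element
theorem pv_filterMap_range (xs : List Int) : ∀ (m : Nat), m ≤ xs.length →
    List.filterMap (fun k : Nat => xs[((m : Int) - 1 - (k : Int)).toNat]?) (List.range m)
      = (xs.take m).reverse := by
  intro m
  induction m with
  | zero => simp
  | succ m ih =>
    intro h
    have hm : m < xs.length := h
    rw [List.range_succ_eq_map, List.filterMap_cons, List.filterMap_map]
    have hfe : ((fun k : Nat => xs[((↑(m+1) : Int) - 1 - (k : Int)).toNat]?) ∘ (fun k => k + 1))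
        = (fun k : Nat => xs[((m : Int) - 1 - (k : Int)).toNat]?) := by
      funext k; simp only [Function.comp]; congr 1; push_cast; omega
    rw [hfe, ih (Nat.le_of_lt hm)]
    have h0 : ((↑(m+1) : Int) - 1 - ((0:Nat) : Int)).toNat = m := by push_cast; omega
    rw [h0, List.getElem?_eq_getElem hm]
    have ht : List.take (m+1) xs = List.take m xs ++ [xs[m]] := by
      rw [List.take_add_one, List.getElem?_eq_getElem hm]; simp
    rw [ht, List.reverse_append, List.reverse_singleton, List.singleton_append]

theorem pv_slice_neg2 (xs : List Int) :
    PySem.List.slice? xs (some (-2)) none (-1) = some xs.dropLast.reverse := by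
  simp only [PySem.List.slice?, PySem.List.sliceIndices]
  norm_num
  by_cases h : 1 < xs.length
  · have hmax : max (-2 + (xs.length : Int)) (-1) = (xs.length : Int) - 2 := by omega
    rw [if_pos h, hmax]
    have hcnt : ((xs.length : Int) - 2 + 1).toNat = xs.length - 1 := by omega
    rw [hcnt]
    have hfe : (fun k : Nat => xs[((xs.length : Int) - 2 + -(k:Int)).toNat]?)
        = (fun k : Nat => xs[((↑(xs.length - 1) : Int) - 1 - (k : Int)).toNat]?) := by
      funext k; congr 1; push_cast [Nat.cast_sub (by omega : 1 ≤ xs.length)]; omega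
    rw [hfe, pv_filterMap_range xs (xs.length - 1) (by omega), List.dropLast_eq_take]
  · rw [if_neg h]
    have : xs.dropLast = [] := by
      rw [List.dropLast_eq_take]; apply List.take_eq_nil_iff.mpr; omega
    simp [this]

-- net_income[:-1] is the list without its last element
theorem pv_slice_upto_neg1 (xs : List Int) :
    PySem.List.slice xs none (some (-1)) = xs.dropLast := by
  simp only [PySem.List.slice, PySem.List.clampIdx]
  rw [List.dropLast_eq_take]
  cases xs with
  | nil => simp
  | cons x t =>
    norm_num
    rw [if_neg (by simp : ¬ ((t.length : Int) < 0))]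
    omega

theorem pvLoopA_acc (l : List Int) : ∀ (r : Int), pvLoopA l r = r + pvLoopA l 0 := by
  induction l with
  | nil => intro r; simp [pvLoopA]
  | cons i rest ih =>
    intro r
    by_cases h : i ≥ 0
    · simp only [pvLoopA, if_pos h]
      rw [ih (r + 1), ih (0 + 1)]; ring
    · simp [pvLoopA, if_neg h]

-- A's break-walk over the reverse equals B's reset-fold over the list itself
theorem pv_loop_eq (l : List Int) :
    pvLoopA l.reverse 0 = l.foldl (fun c v => if v ≥ 0 then c + 1 else 0) 0 := by
  induction l using List.reverseRecOn with
  | nil => simp [pvLoopA]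
  | append_singleton m x ih =>
    rw [List.reverse_append, List.reverse_singleton, List.singleton_append,
        List.foldl_append, List.foldl_cons, List.foldl_nil]
    by_cases h : x ≥ 0
    · simp only [pvLoopA, if_pos h]
      rw [pvLoopA_acc, ih]
      ring
    · simp [pvLoopA, if_neg h]

-- ===== VERDICT (by name: the statement is the Claim_ definition above) =====
theorem continue_win_num_py_spec : Claim_equal_continue_win_num_py := by
  intro net_income _
  unfold Spec_continue_win_num_py continue_win_num_py continue_win_num_py_alt
  rw [pv_slice_neg2, Option.getD_some, pv_slice_upto_neg1, pv_loop_eq]
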